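-- pv_equiv track=rewrite | github.com/bigen1925/cracking_coding_interview | chapter8/e3.py | search_magic_index
-- ===== SOURCE A (Python) =====
-- from typing import List
--
-- def search_magic_index(target: List[int], start_index: int = None, end_index: int = None):
--     # 検索区間が与えられてない場合は、全区間を検索する
--     if start_index is None:
--         start_index = 0
--     if end_index is None:
--         end_index = len(target) - 1
--
--     # 検索区間の始端と終端の値がindexと一致していれば、区間全体がmagic indexになっている
--     if target[start_index] == start_index and target[end_index] == end_index:
--         return target[start_index:end_index + 1]
--
--     # 検索区間のindexが、始端と終端の値の内側に入っている場合は、区間の一部がmagic indexになっているので、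
--     # 前半分と後ろ半分に分割して再度検索する
--     if target[start_index] <= start_index and end_index <= target[end_index]:
--         # 始端と終端の中間のindexを取得
--         half = (end_index + start_index) // 2
--         # 前半分の検索結果を取得
--         first = search_magic_index(
--             target,
--             start_index=start_index,
--             end_index=half,
--         )
--         # 後ろ半分の検索結果を取得
--         second = search_magic_index(
--             target,
--             start_index=half + 1,
--             end_index=end_index
--         )
--         # 結果を結合して返す
--         return first + second
--
--     # 検索区間のindexが始端と終端の内側に入らない場合は、magic indexは存在しない
--     return []
-- ===== SOURCE B (Python) =====
-- from typing import List
--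
-- def search_magic_index(target: List[int], start_index: int = None, end_index: int = None):
--     # Two staged passes over a flat interval list: repeatedly rewrite the list by
--     # splitting every splittable interval in place (keeping left-to-right order),
--     # then render the terminal intervals into the result.
--     if start_index is None:
--         start_index = 0
--     if end_index is None:
--         end_index = len(target) - 1
--
--     def splittable(s, e):
--         return (not (target[s] == s and target[e] == e)
--                 and target[s] <= s and e <= target[e])
--
--     intervals = [(start_index, end_index)]
--     while any(splittable(s, e) for s, e in intervals):
--         new_intervals = []
--         for s, e in intervals:
--             if splittable(s, e):
--                 half = (e + s) // 2
--                 new_intervals.append((s, half))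
--                 new_intervals.append((half + 1, e))
--             else:
--                 new_intervals.append((s, e))
--         intervals = new_intervals
--
--     out = []
--     for s, e in intervals:
--         if target[s] == s and target[e] == e:
--             out.extend(target[s:e + 1])
--     return out
-- ===== Notes on version B (the rewrite author's own statement) =====
-- stated objective: alternative
-- what changed: Replaces A's divide-and-conquer recursion by two staged passes over a flat interval list: a rewrite loop that repeatedly splits every splittable interval in place (preserving left-to-right order) until the list is stable, then a single render pass that emits the slice of each interval whose endpoints are both magic.
-- outside the precondition, e.g. on search_magic_index([7, 3, 5, -4], 3, -4): A returns [], B returns []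
import Mathlib
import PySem

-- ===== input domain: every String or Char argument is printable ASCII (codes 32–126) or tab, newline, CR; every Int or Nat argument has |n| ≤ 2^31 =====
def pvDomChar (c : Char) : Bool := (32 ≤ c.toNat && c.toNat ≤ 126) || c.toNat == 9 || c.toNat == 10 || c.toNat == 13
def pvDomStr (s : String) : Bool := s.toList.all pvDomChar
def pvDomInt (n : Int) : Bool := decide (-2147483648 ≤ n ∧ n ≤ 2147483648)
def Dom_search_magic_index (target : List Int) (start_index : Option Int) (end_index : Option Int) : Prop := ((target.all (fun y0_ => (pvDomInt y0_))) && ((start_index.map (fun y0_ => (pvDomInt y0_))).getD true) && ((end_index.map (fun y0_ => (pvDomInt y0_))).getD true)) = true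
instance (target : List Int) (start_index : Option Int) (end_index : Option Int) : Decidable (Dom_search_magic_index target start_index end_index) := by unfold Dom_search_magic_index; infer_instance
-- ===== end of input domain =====

-- B replaces A's divide-and-conquer recursion by two staged passes over a flat list of
-- intervals: repeated in-place splitting rewrites until no interval is splittable, then
-- one render pass (alternative decomposition, same output order).

-- ===== PORT A =====
-- A's recursion; the Nat argument is fuel, a totality guard only: Pre_ guarantees
-- enough fuel for every admitted input (A itself diverges on inverted intervals,
-- which Pre_ excludes).
def searchMagicRecA (t : List Int) : Nat → Int → Int → List Int
  | 0, _, _ => []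
  | fuel + 1, s, e =>
    if PySem.List.pyGetD t s 0 = s ∧ PySem.List.pyGetD t e 0 = e then
      PySem.List.slice t (some s) (some (e + 1))
    else if PySem.List.pyGetD t s 0 ≤ s ∧ e ≤ PySem.List.pyGetD t e 0 then
      let half := PySem.Int.floordiv (e + s) 2
      searchMagicRecA t fuel s half ++ searchMagicRecA t fuel (half + 1) e
    else []

def search_magic_index (target : List Int) (start_index : Option Int) (end_index : Option Int) : List Int :=
  let s := start_index.getD 0
  let e := end_index.getD ((target.length : Int) - 1)
  searchMagicRecA target (2 * target.length + 2) s e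

-- ===== PORT B =====
-- Source B's helper `splittable(s, e)`
def magicSplittable (t : List Int) (p : Int × Int) : Bool :=
  !(decide (PySem.List.pyGetD t p.1 0 = p.1 ∧ PySem.List.pyGetD t p.2 0 = p.2))
  && decide (PySem.List.pyGetD t p.1 0 ≤ p.1) && decide (p.2 ≤ PySem.List.pyGetD t p.2 0)

-- one body of Source B's while loop: rewrite the interval list, splitting in place
def magicSplitPass (t : List Int) (l : List (Int × Int)) : List (Int × Int) :=
  l.flatMap (fun p =>
    if magicSplittable t p then
      let half := PySem.Int.floordiv (p.2 + p.1) 2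
      [(p.1, half), (half + 1, p.2)]
    else [p])

-- Source B's while loop; the Nat argument is fuel, a totality guard only (the Python
-- loop spins forever on inverted intervals, which Pre_ excludes).
def magicLoop (t : List Int) : Nat → List (Int × Int) → List (Int × Int)
  | 0, l => l
  | fuel + 1, l =>
    if l.any (magicSplittable t) then magicLoop t fuel (magicSplitPass t l) else l

-- Source B's final render loop
def magicRender (t : List Int) (l : List (Int × Int)) : List Int :=
  l.foldl (fun out p =>
    if PySem.List.pyGetD t p.1 0 = p.1 ∧ PySem.List.pyGetD t p.2 0 = p.2 then
      out ++ PySem.List.slice t (some p.1) (some (p.2 + 1))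
    else out) []

def search_magic_index_alt (target : List Int) (start_index : Option Int) (end_index : Option Int) : List Int :=
  let s := start_index.getD 0
  let e := end_index.getD ((target.length : Int) - 1)
  magicRender target (magicLoop target (2 * target.length + 2) [(s, e)])

-- ===== PRECONDITION & SPEC =====
-- Pre_ admits the inputs on which A returns without entering the divide branch on an
-- inverted interval: a valid non-inverted resolved interval, or a first step that
-- already returns (its short-circuit index accesses valid) — both endpoints magic, or
-- the split test failing.  Excluded: out-of-range accesses (IndexError) and inverted
-- intervals entering the divide branch, where A recurses without a base case (it
-- usually recurses forever; when the recursion happens to bottom out it returns an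
-- accidental empty-slice concatenation).
def Pre_search_magic_index (target : List Int) (start_index : Option Int) (end_index : Option Int) : Prop :=
  let s := start_index.getD 0
  let e := end_index.getD ((target.length : Int) - 1)
  let L := (target.length : Int)
  (-L ≤ s ∧ s < L) ∧
  ((-L ≤ e ∧ e < L ∧ s ≤ e) ∨
   ¬(PySem.List.pyGetD target s 0 ≤ s) ∨
   (-L ≤ e ∧ e < L ∧
     ((PySem.List.pyGetD target s 0 = s ∧ PySem.List.pyGetD target e 0 = e) ∨
      ¬(e ≤ PySem.List.pyGetD target e 0))))
instance (target : List Int) (start_index : Option Int) (end_index : Option Int) : Decidable (Pre_search_magic_index target start_index end_index) := by unfold Pre_search_magic_index; infer_instance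

def pvWitness_search_magic_index : List Int × Option Int × Option Int := ([-1, 1, 3], none, none)

def Spec_search_magic_index (target : List Int) (start_index : Option Int) (end_index : Option Int) (out : List Int) : Prop := out = search_magic_index_alt target start_index end_index
instance (target : List Int) (start_index : Option Int) (end_index : Option Int) (out : List Int) : Decidable (Spec_search_magic_index target start_index end_index out) := by unfold Spec_search_magic_index; infer_instance

-- ===== CLAIM (what is proved, stated in full; the proofs are below) =====
def Claim_equal_search_magic_index : Prop := ∀ (target : List Int) (start_index : Option Int) (end_index : Option Int), Dom_search_magic_index target start_index end_index → Pre_search_magic_index target start_index end_index → Spec_search_magic_index target start_index end_index (search_magic_index target start_index end_index)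

-- ===== LEMMAS AND PROOFS =====

-- Proof-side reference function: A's recursion without fuel, well-founded on the
-- interval width (the recursive branch is reachable only when s < e, made explicit here).
def magicRef (t : List Int) (s e : Int) : List Int :=
  if PySem.List.pyGetD t s 0 = s ∧ PySem.List.pyGetD t e 0 = e then
    PySem.List.slice t (some s) (some (e + 1))
  else if PySem.List.pyGetD t s 0 ≤ s ∧ e ≤ PySem.List.pyGetD t e 0 ∧ s < e then
    magicRef t s (PySem.Int.floordiv (e + s) 2) ++
    magicRef t (PySem.Int.floordiv (e + s) 2 + 1) e
  else []
termination_by (e - s).toNat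
decreasing_by
  · have h := PySem.Int.floordiv_eq_ediv_of_pos (a := e + s) (b := 2) (by omega)
    rename_i hb; omega
  · have h := PySem.Int.floordiv_eq_ediv_of_pos (a := e + s) (b := 2) (by omega)
    rename_i hb; omega

-- the midpoint sits strictly inside a nondegenerate interval
lemma magic_mid_bounds {s e : Int} (h : s < e) :
    s ≤ PySem.Int.floordiv (e + s) 2 ∧ PySem.Int.floordiv (e + s) 2 < e := by
  have hd := PySem.Int.floordiv_eq_ediv_of_pos (a := e + s) (b := 2) (by omega)
  omega

-- with enough fuel, A's recursion computes magicRef on non-inverted intervals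
lemma recA_eq_ref (t : List Int) :
    ∀ n s e, s ≤ e → (e - s).toNat ≤ n → ∀ f, n < f →
      searchMagicRecA t f s e = magicRef t s e := by
  intro n
  induction n with
  | zero =>
    intro s e hse hn f hf
    match f, hf with
    | f + 1, _ =>
      rw [searchMagicRecA, magicRef]
      split
      · rfl
      · rename_i h1
        split
        · rename_i h2
          have hseq : s = e := by omega
          subst hseq
          have hv : PySem.List.pyGetD t s 0 = s := le_antisymm h2.1 h2.2
          exact absurd ⟨hv, hv⟩ h1
        · rename_i h2
          rw [if_neg (fun h => h2 ⟨h.1, h.2.1⟩)]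
  | succ n ih =>
    intro s e hse hn f hf
    match f, hf with
    | f + 1, _ =>
      rw [searchMagicRecA, magicRef]
      split
      · rfl
      · rename_i h1
        split
        · rename_i h2
          by_cases hlt : s < e
          · have hm := magic_mid_bounds hlt
            rw [if_pos ⟨h2.1, h2.2, hlt⟩]
            show searchMagicRecA t f s (PySem.Int.floordiv (e + s) 2) ++
                 searchMagicRecA t f (PySem.Int.floordiv (e + s) 2 + 1) e = _
            rw [ih s _ (by omega) (by omega) f (by omega),
                ih _ e (by omega) (by omega) f (by omega)]
          · have hseq : s = e := by omega
            subst hseq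
            have hv : PySem.List.pyGetD t s 0 = s := le_antisymm h2.1 h2.2
            exact absurd ⟨hv, hv⟩ h1
        · rename_i h2
          rw [if_neg (fun h => h2 ⟨h.1, h.2.1⟩)]

-- one step of A when the first branch fires or the split test fails
lemma recA_step0 (t : List Int) (f : Nat) (s e : Int)
    (h : (PySem.List.pyGetD t s 0 = s ∧ PySem.List.pyGetD t e 0 = e) ∨
         ¬(PySem.List.pyGetD t s 0 ≤ s ∧ e ≤ PySem.List.pyGetD t e 0)) :
    searchMagicRecA t (f + 1) s e =
      if PySem.List.pyGetD t s 0 = s ∧ PySem.List.pyGetD t e 0 = e then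
        PySem.List.slice t (some s) (some (e + 1))
      else [] := by
  rw [searchMagicRecA]
  by_cases h1 : PySem.List.pyGetD t s 0 = s ∧ PySem.List.pyGetD t e 0 = e
  · rw [if_pos h1, if_pos h1]
  · rcases h with h | h
    · exact absurd h h1
    · rw [if_neg h1, if_neg h, if_neg h1]

-- splittable unpacked to a proposition
lemma splittable_iff (t : List Int) (p : Int × Int) :
    magicSplittable t p = true ↔
      ¬(PySem.List.pyGetD t p.1 0 = p.1 ∧ PySem.List.pyGetD t p.2 0 = p.2) ∧
      PySem.List.pyGetD t p.1 0 ≤ p.1 ∧ p.2 ≤ PySem.List.pyGetD t p.2 0 := by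
  simp only [magicSplittable, Bool.and_eq_true, Bool.not_eq_true', decide_eq_false_iff_not,
    decide_eq_true_eq, and_assoc]

-- a splittable non-inverted interval is nondegenerate
lemma splittable_lt (t : List Int) (p : Int × Int) (hse : p.1 ≤ p.2)
    (h : magicSplittable t p = true) : p.1 < p.2 := by
  obtain ⟨x, y⟩ := p
  rw [splittable_iff] at h
  simp only at h hse ⊢
  by_contra hnlt
  have heq : x = y := le_antisymm hse (by omega)
  subst heq
  have hv := le_antisymm h.2.1 h.2.2
  exact h.1 ⟨hv, hv⟩

-- a terminal interval renders exactly to its magicRef value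
lemma not_splittable_ref (t : List Int) (p : Int × Int)
    (h : magicSplittable t p = false) :
    magicRef t p.1 p.2 =
      if PySem.List.pyGetD t p.1 0 = p.1 ∧ PySem.List.pyGetD t p.2 0 = p.2 then
        PySem.List.slice t (some p.1) (some (p.2 + 1))
      else [] := by
  rw [magicRef]
  by_cases h1 : PySem.List.pyGetD t p.1 0 = p.1 ∧ PySem.List.pyGetD t p.2 0 = p.2
  · rw [if_pos h1, if_pos h1]
  · rw [if_neg h1, if_neg h1]
    have h2 : ¬(PySem.List.pyGetD t p.1 0 ≤ p.1 ∧ p.2 ≤ PySem.List.pyGetD t p.2 0) := by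
      intro hc
      have : magicSplittable t p = true := (splittable_iff t p).mpr ⟨h1, hc⟩
      simp [this] at h
    rw [if_neg (fun hc => h2 ⟨hc.1, hc.2.1⟩)]

-- splitting a splittable interval preserves its magicRef value
lemma ref_split (t : List Int) (p : Int × Int) (hlt : p.1 < p.2)
    (h : magicSplittable t p = true) :
    magicRef t p.1 p.2 =
      magicRef t p.1 (PySem.Int.floordiv (p.2 + p.1) 2) ++
      magicRef t (PySem.Int.floordiv (p.2 + p.1) 2 + 1) p.2 := by
  rw [splittable_iff] at h
  rw [magicRef, if_neg h.1, if_pos ⟨h.2.1, h.2.2, hlt⟩]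

-- flatMap respects pointwise equality on members
lemma magic_flatMap_congr {α β : Type} (l : List α) (f g : α → List β)
    (h : ∀ x ∈ l, f x = g x) : l.flatMap f = l.flatMap g := by
  induction l with
  | nil => rfl
  | cons a r ih =>
    simp only [List.flatMap_cons, h a (by simp), ih (fun x hx => h x (by simp [hx]))]

-- a pass over a fully terminal list is the identity
lemma splitPass_id (t : List Int) :
    ∀ l : List (Int × Int), l.any (magicSplittable t) = false →
      magicSplitPass t l = l := by
  intro l h
  induction l with
  | nil => rfl
  | cons p rest ih =>
    simp only [List.any_cons, Bool.or_eq_false_iff] at h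
    have hr := ih h.2
    simp only [magicSplitPass] at hr ⊢
    rw [List.flatMap_cons, if_neg (by simp [h.1]), hr]
    simp

-- total width of an interval list; each changing pass strictly decreases it
def magicMeasure (l : List (Int × Int)) : Nat :=
  (l.map (fun p => (p.2 - p.1).toNat)).sum

-- one rewriting pass: keeps intervals non-inverted, preserves the flatMap of magicRef,
-- and strictly decreases the measure when some interval is splittable
lemma pass_inv (t : List Int) :
    ∀ l : List (Int × Int), (∀ p ∈ l, p.1 ≤ p.2) →
      (∀ p ∈ magicSplitPass t l, p.1 ≤ p.2) ∧
      (magicSplitPass t l).flatMap (fun p => magicRef t p.1 p.2) =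
        l.flatMap (fun p => magicRef t p.1 p.2) ∧
      (l.any (magicSplittable t) = true →
        magicMeasure (magicSplitPass t l) < magicMeasure l) := by
  intro l
  induction l with
  | nil => intro _; refine ⟨by simp [magicSplitPass], by simp [magicSplitPass], by simp⟩
  | cons p rest ih =>
    intro hgood
    have hp : p.1 ≤ p.2 := hgood p (by simp)
    obtain ⟨ih1, ih2, ih3⟩ := ih (fun q hq => hgood q (by simp [hq]))
    by_cases hs : magicSplittable t p = true
    · have hlt := splittable_lt t p hp hs
      have hm := magic_mid_bounds hlt
      have hpass : magicSplitPass t (p :: rest) =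
          (p.1, PySem.Int.floordiv (p.2 + p.1) 2) ::
          (PySem.Int.floordiv (p.2 + p.1) 2 + 1, p.2) :: magicSplitPass t rest := by
        simp [magicSplitPass, hs]
      refine ⟨?_, ?_, ?_⟩
      · intro q hq
        rw [hpass] at hq
        simp only [List.mem_cons] at hq
        rcases hq with h | h | h
        · subst h; exact hm.1
        · subst h; simp; omega
        · exact ih1 q h
      · rw [hpass]
        simp only [List.flatMap_cons, ih2]
        rw [← List.append_assoc, ← ref_split t p hlt hs]
      · intro _
        rw [hpass]
        simp only [magicMeasure, List.map_cons, List.sum_cons]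
        have hle : ((magicSplitPass t rest).map (fun q => (q.2 - q.1).toNat)).sum ≤
            (rest.map (fun q => (q.2 - q.1).toNat)).sum := by
          by_cases ha : rest.any (magicSplittable t) = true
          · exact le_of_lt (ih3 ha)
          · rw [splitPass_id t rest (by simpa using ha)]
        omega
    · have hs' : magicSplittable t p = false := by simpa using hs
      have hpass : magicSplitPass t (p :: rest) = p :: magicSplitPass t rest := by
        simp [magicSplitPass, hs']
      refine ⟨?_, ?_, ?_⟩
      · intro q hq
        rw [hpass] at hq
        simp only [List.mem_cons] at hq
        rcases hq with h | h
        · subst h; exact hp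
        · exact ih1 q h
      · rw [hpass]; simp only [List.flatMap_cons, ih2]
      · intro hany
        have hany' : rest.any (magicSplittable t) = true := by
          simpa [hs'] using hany
        rw [hpass]
        simp only [magicMeasure, List.map_cons, List.sum_cons] at *
        have := ih3 hany'
        omega

-- the render loop is the flatMap of the per-interval render
lemma render_flat (t : List Int) :
    ∀ (l : List (Int × Int)) (acc : List Int),
      l.foldl (fun out p =>
        if PySem.List.pyGetD t p.1 0 = p.1 ∧ PySem.List.pyGetD t p.2 0 = p.2 then
          out ++ PySem.List.slice t (some p.1) (some (p.2 + 1))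
        else out) acc =
      acc ++ l.flatMap (fun p =>
        if PySem.List.pyGetD t p.1 0 = p.1 ∧ PySem.List.pyGetD t p.2 0 = p.2 then
          PySem.List.slice t (some p.1) (some (p.2 + 1))
        else []) := by
  intro l
  induction l with
  | nil => intro acc; simp
  | cons p rest ih =>
    intro acc
    simp only [List.foldl_cons, List.flatMap_cons, ih]
    split <;> simp [List.append_assoc]

-- with enough fuel, the whole pipeline computes the flatMap of magicRef
lemma loop_correct (t : List Int) :
    ∀ f (l : List (Int × Int)), (∀ p ∈ l, p.1 ≤ p.2) → magicMeasure l < f →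
      magicRender t (magicLoop t f l) = l.flatMap (fun p => magicRef t p.1 p.2) := by
  intro f
  induction f with
  | zero => intro l _ h; omega
  | succ f ih =>
    intro l hgood hμ
    rw [magicLoop]
    by_cases hany : l.any (magicSplittable t) = true
    · rw [if_pos hany]
      obtain ⟨h1, h2, h3⟩ := pass_inv t l hgood
      rw [ih _ h1 (by have := h3 hany; omega), h2]
    · rw [if_neg hany]
      have hall : ∀ q ∈ l, magicSplittable t q = false := by simpa using hany
      unfold magicRender
      rw [render_flat t l []]
      simp only [List.nil_append]
      apply magic_flatMap_congr
      intro p hp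
      rw [not_splittable_ref t p (hall p hp)]

-- ===== VERDICT (by name: the statement is the Claim_ definition above) =====
theorem search_magic_index_spec : Claim_equal_search_magic_index := by
  intro target start_index end_index _ hpre
  obtain ⟨hs, hcase⟩ := hpre
  unfold Spec_search_magic_index search_magic_index search_magic_index_alt
  set s := start_index.getD 0 with hs_def
  set e := end_index.getD ((target.length : Int) - 1) with he_def
  have step0 : ((PySem.List.pyGetD target s 0 = s ∧ PySem.List.pyGetD target e 0 = e) ∨
      ¬(PySem.List.pyGetD target s 0 ≤ s ∧ e ≤ PySem.List.pyGetD target e 0)) →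
      searchMagicRecA target (2 * target.length + 2) s e =
        magicRender target (magicLoop target (2 * target.length + 2) [(s, e)]) := by
    intro h
    have hns : magicSplittable target (s, e) = false := by
      rcases h with h | h
      · simp [magicSplittable, h.1, h.2]
      · rcases (not_and_or.mp h) with h | h <;> simp [magicSplittable, h]
    have hloop : magicLoop target (2 * target.length + 2) [(s, e)] = [(s, e)] := by
      show magicLoop target (2 * target.length + 1 + 1) [(s, e)] = [(s, e)]
      rw [magicLoop, if_neg (by simp [hns])]
    rw [hloop, recA_step0 target (2 * target.length + 1) s e h]
    unfold magicRender
    rw [render_flat]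
    simp
  rcases hcase with ⟨he1, he2, hse⟩ | hns | ⟨_, _, h1 | hne⟩
  · rw [recA_eq_ref target (2 * target.length + 1) s e hse (by omega) _ (by omega)]
    rw [loop_correct target _ [(s, e)] (by simpa using hse)
        (by simp only [magicMeasure, List.map_cons, List.map_nil, List.sum_cons, List.sum_nil]; omega)]
    simp
  · exact step0 (Or.inr fun hc => hns hc.1)
  · exact step0 (Or.inl h1)
  · exact step0 (Or.inr fun hc => hne hc.2)
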